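-- pv_equiv track=rewrite | github.com/arjunrajlaboratory/ProbeDesign | src/probedesign/masking.py | hits_to_mask
-- ===== SOURCE A (Python) =====
-- from typing import List, Optional, Tuple
--
-- def hits_to_mask(
--     hits: List[int],
--     mer_length: int,
--     threshold: int = 0,
-- ) -> List[int]:
--     """Convert hit counts to a binary mask.
--
--     Positions where hits > threshold are marked as 1, and the mask is
--     extended to cover the full mer_length from each hit position.
--
--     Args:
--         hits: Hit counts per position
--         mer_length: Length of the n-mers used for alignment
--         threshold: Minimum hits to trigger masking (default 0 = any hit)
--
--     Returns:
--         Binary mask (0 or 1 for each position)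
--     """
--     mask = [0] * len(hits)
--
--     for i, hit_count in enumerate(hits):
--         if hit_count > threshold:
--             # Extend mask to cover the full mer
--             for j in range(i, min(i + mer_length, len(mask))):
--                 mask[j] = 1
--
--     return mask
-- ===== SOURCE B (Python) =====
-- def hits_to_mask(hits, mer_length, threshold=0):
--     """Single pass: keep the farthest index `reach` any previous hit extends to;
--     position i is masked iff i < reach after absorbing hits[i]."""
--     mask = []
--     reach = 0
--     for i, h in enumerate(hits):
--         if h > threshold and i + mer_length > reach:
--             reach = i + mer_length
--         mask.append(1 if i < reach else 0)
--     return mask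
-- ===== Notes on version B (the rewrite author's own statement) =====
-- stated objective: faster
-- what changed: Replaces the nested re-marking loop (each hit writes mer_length mask cells) with a one-pass farthest-reach scan that keeps the maximal extent of any hit seen so far and emits each mask bit once.
import Mathlib
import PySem

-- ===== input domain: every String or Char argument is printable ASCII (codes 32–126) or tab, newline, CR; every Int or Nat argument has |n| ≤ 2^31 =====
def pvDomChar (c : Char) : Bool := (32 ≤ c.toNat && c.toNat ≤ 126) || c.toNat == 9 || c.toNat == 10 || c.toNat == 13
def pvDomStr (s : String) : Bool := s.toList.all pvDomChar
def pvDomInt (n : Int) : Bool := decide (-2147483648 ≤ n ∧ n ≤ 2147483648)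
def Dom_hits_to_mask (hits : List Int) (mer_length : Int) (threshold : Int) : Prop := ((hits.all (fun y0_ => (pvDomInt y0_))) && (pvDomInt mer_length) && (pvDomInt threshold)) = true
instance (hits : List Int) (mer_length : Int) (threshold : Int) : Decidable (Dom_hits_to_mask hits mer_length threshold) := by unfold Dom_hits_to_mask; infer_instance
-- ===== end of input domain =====

-- B replaces A's nested re-marking loop (each hit rewrites mer_length cells) by a
-- one-pass farthest-reach scan; equal return value on all inputs (A is total).

-- ===== PORT A =====
-- inner loop of A: `for j in range(i, min(i + mer_length, len(mask))): mask[j] = 1`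
def pvPaint (m : List Int) (a b : Int) : List Int :=
  (PySem.List.pyRange a b 1).foldl (fun m j => PySem.List.pySetD m j 1) m

def hits_to_mask (hits : List Int) (mer_length : Int) (threshold : Int) : List Int :=
  let mask := List.replicate hits.length (0 : Int)
  (PySem.List.enumerate hits).foldl
    (fun mask p =>
      if p.2 > threshold then pvPaint mask p.1 (min (p.1 + mer_length) (mask.length : Int))
      else mask) mask

-- ===== PORT B =====
def hits_to_mask_alt (hits : List Int) (mer_length : Int) (threshold : Int) : List Int :=
  ((PySem.List.enumerate hits).foldl
    (fun (st : List Int × Int) p =>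
      let reach := if p.2 > threshold ∧ p.1 + mer_length > st.2 then p.1 + mer_length else st.2
      (st.1 ++ [if p.1 < reach then (1 : Int) else 0], reach)) ([], 0)).1

-- ===== PRECONDITION & SPEC =====
def Spec_hits_to_mask (hits : List Int) (mer_length : Int) (threshold : Int) (out : List Int) : Prop := out = hits_to_mask_alt hits mer_length threshold
instance (hits : List Int) (mer_length : Int) (threshold : Int) (out : List Int) : Decidable (Spec_hits_to_mask hits mer_length threshold out) := by unfold Spec_hits_to_mask; infer_instance

-- ===== CLAIM (what is proved, stated in full; the proofs are below) =====
def Claim_equal_hits_to_mask : Prop := ∀ (hits : List Int) (mer_length : Int) (threshold : Int), Dom_hits_to_mask hits mer_length threshold → Spec_hits_to_mask hits mer_length threshold (hits_to_mask hits mer_length threshold)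

-- ===== LEMMAS AND PROOFS =====

-- ---- B side: the fold produces this recursively defined list ----
def pvOutB (mer t : Int) : List Int → Int → Int → List Int
  | [], _, _ => []
  | h :: xs, s, r =>
    let r' := if h > t ∧ s + mer > r then s + mer else r
    (if s < r' then (1 : Int) else 0) :: pvOutB mer t xs (s + 1) r'

lemma pvFoldB_eq (mer t : Int) (xs : List Int) (s r : Int) (acc : List Int) :
    ((PySem.List.enumerate xs s).foldl
      (fun (st : List Int × Int) p =>
        let reach := if p.2 > t ∧ p.1 + mer > st.2 then p.1 + mer else st.2
        (st.1 ++ [if p.1 < reach then (1 : Int) else 0], reach)) (acc, r)).1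
    = acc ++ pvOutB mer t xs s r := by
  induction xs generalizing s r acc with
  | nil => simp [PySem.List.enumerate_nil, pvOutB]
  | cons x xs ih =>
    simp only [PySem.List.enumerate_cons, List.foldl_cons, pvOutB]
    rw [ih]
    simp

lemma pvOutB_length (mer t : Int) (xs : List Int) (s r : Int) :
    (pvOutB mer t xs s r).length = xs.length := by
  induction xs generalizing s r with
  | nil => simp [pvOutB]
  | cons x xs ih => simp [pvOutB, ih]

-- coverage predicate characterising B's output bit k (offset s, incoming reach r)
def pvPm (xs : List Int) (mer t s r : Int) (k : Nat) : Prop :=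
  s + (k : Int) < r ∨ ∃ j ∈ List.range (k + 1), xs.getD j t > t ∧ s + (k : Int) < s + (j : Int) + mer

lemma pvPm_zero (x : Int) (xs : List Int) (mer t s r : Int) :
    pvPm (x :: xs) mer t s r 0 ↔ (s < r ∨ (x > t ∧ s < s + mer)) := by
  unfold pvPm
  simp only [List.mem_range]
  constructor
  · rintro (h | ⟨j, hj, hgt, hlt⟩)
    · left; push_cast at h; omega
    · obtain rfl : j = 0 := by omega
      right; exact ⟨by simpa using hgt, by push_cast at hlt; omega⟩
  · rintro (h | ⟨hgt, hlt⟩)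
    · left; push_cast; omega
    · right; exact ⟨0, by omega, by simpa using hgt, by push_cast; omega⟩

lemma pvPm_succ (x : Int) (xs : List Int) (mer t s r : Int) (k : Nat) :
    pvPm (x :: xs) mer t s r (k + 1)
      ↔ pvPm xs mer t (s + 1) (if x > t ∧ s + mer > r then s + mer else r) k := by
  unfold pvPm
  simp only [List.mem_range]
  by_cases hx : x > t <;> by_cases hr : s + mer > r <;>
    simp only [hx, hr, and_self, true_and, false_and, and_false, if_true, if_false] <;>
  · constructor
    · rintro (h | ⟨j, hj, hgt, hlt⟩)
      · left; push_cast at h ⊢; omega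
      · rcases j with _ | j'
        · simp only [List.getD_cons_zero] at hgt
          first
            | (exact absurd hgt hx)
            | (left; push_cast at hlt ⊢; omega)
        · right; exact ⟨j', by omega, by simpa using hgt, by push_cast at hlt ⊢; omega⟩
    · rintro (h | ⟨j, hj, hgt, hlt⟩)
      · first
          | (left; push_cast at h ⊢; omega)
          | (right; exact ⟨0, by omega, by simpa using hx, by push_cast at h ⊢; omega⟩)
      · right; exact ⟨j + 1, by omega, by simpa using hgt, by push_cast at hlt ⊢; omega⟩

lemma pvOutB_get (mer t : Int) (xs : List Int) (s r : Int) (k : Nat) (hk : k < xs.length) :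
    (pvPm xs mer t s r k → (pvOutB mer t xs s r)[k]? = some 1) ∧
    (¬ pvPm xs mer t s r k → (pvOutB mer t xs s r)[k]? = some 0) := by
  induction xs generalizing s r k with
  | nil => simp at hk
  | cons x xs ih =>
    cases k with
    | zero =>
      simp only [pvOutB, List.getElem?_cons_zero]
      have hiff : (s < (if x > t ∧ s + mer > r then s + mer else r))
          ↔ pvPm (x :: xs) mer t s r 0 := by
        rw [pvPm_zero]; split <;> omega
      constructor
      · intro hp; rw [if_pos (hiff.mpr hp)]
      · intro hp; rw [if_neg (fun h => hp (hiff.mp h))]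
    | succ k =>
      simp only [pvOutB, List.getElem?_cons_succ]
      obtain ⟨ih1, ih2⟩ :=
        ih (s + 1) (if x > t ∧ s + mer > r then s + mer else r) k (by simpa using hk)
      constructor
      · intro hp; exact ih1 ((pvPm_succ x xs mer t s r k).mp hp)
      · intro hp; exact ih2 (fun h => hp ((pvPm_succ x xs mer t s r k).mpr h))

-- ---- A side ----
lemma pvPaintFold_length (l : List Int) (m : List Int) :
    (l.foldl (fun m j => PySem.List.pySetD m j 1) m).length = m.length := by
  induction l generalizing m with
  | nil => rfl
  | cons j l ih => simp [ih, PySem.List.length_pySetD]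

lemma pvPaint_length (m : List Int) (a b : Int) : (pvPaint m a b).length = m.length :=
  pvPaintFold_length _ m

lemma pvPaint_get (m : List Int) (a b : Int) (ha : 0 ≤ a) (hb : b ≤ (m.length : Int)) (k : Nat) :
    (pvPaint m a b)[k]? = if a ≤ (k : Int) ∧ (k : Int) < b then some 1 else m[k]? := by
  by_cases hab : b ≤ a
  · unfold pvPaint
    rw [PySem.List.pyRange_one_eq_nil hab]
    simp only [List.foldl_nil]
    rw [if_neg (by omega)]
  · push_neg at hab
    have hn : ((b - a).toNat) ≠ 0 := by omega
    -- induction on the length of the range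
    induction h : (b - a).toNat generalizing a m with
    | zero => omega
    | succ n ih =>
      unfold pvPaint
      rw [PySem.List.pyRange_one_cons hab, List.foldl_cons]
      have hset : PySem.List.pySetD m a (1 : Int) = m.set a.toNat 1 :=
        PySem.List.pySetD_of_nonneg m 1 ha
      by_cases hab' : a + 1 < b
      · have := ih (PySem.List.pySetD m a 1) (a + 1) (by omega)
          (by simp [PySem.List.length_pySetD]; omega) hab' (by omega) (by omega)
        unfold pvPaint at this
        rw [this, hset]
        rw [List.getElem?_set]
        split_ifs <;> first | rfl | omega | (exfalso; omega)
      · -- b = a + 1 : remaining range empty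
        have hb1 : b = a + 1 := by omega
        rw [hb1, PySem.List.pyRange_one_eq_nil (by omega), List.foldl_nil, hset,
          List.getElem?_set]
        split_ifs <;> first | rfl | omega | (exfalso; omega)

-- coverage predicate characterising A's final mask cell k
def pvQA (xs : List Int) (mer t : Int) (s : Int) (n : Nat) (k : Nat) : Prop :=
  ∃ j ∈ List.range xs.length,
    xs.getD j t > t ∧ s + (j : Int) ≤ (k : Int) ∧ (k : Int) < s + (j : Int) + mer ∧ (k : Int) < (n : Int)

lemma pvQA_nil (mer t s : Int) (n k : Nat) : ¬ pvQA [] mer t s n k := by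
  unfold pvQA; simp

lemma pvQA_cons (x : Int) (xs : List Int) (mer t s : Int) (n k : Nat) :
    pvQA (x :: xs) mer t s n k
      ↔ (x > t ∧ s ≤ (k : Int) ∧ (k : Int) < s + mer ∧ (k : Int) < (n : Int))
        ∨ pvQA xs mer t (s + 1) n k := by
  unfold pvQA
  constructor
  · rintro ⟨j, hj, hgt, h1, h2, h3⟩
    match j with
    | 0 => exact Or.inl ⟨by simpa using hgt, by omega, by push_cast at h2 ⊢; omega, h3⟩
    | j' + 1 =>
      right
      exact ⟨j', by simp at hj ⊢; omega, by simpa using hgt, by push_cast at h1 ⊢; omega,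
        by push_cast at h2 ⊢; omega, h3⟩
  · rintro (⟨hgt, h1, h2, h3⟩ | ⟨j, hj, hgt, h1, h2, h3⟩)
    · exact ⟨0, by simp, by simpa using hgt, by omega, by push_cast; omega, h3⟩
    · exact ⟨j + 1, by simp at hj ⊢; omega, by simpa using hgt, by push_cast at h1 ⊢; omega,
        by push_cast at h2 ⊢; omega, h3⟩

def pvFA (mer t : Int) : List Int → (Int × Int) → List Int := fun mask p =>
  if p.2 > t then pvPaint mask p.1 (min (p.1 + mer) (mask.length : Int)) else mask

lemma pvFA_length (mer t : Int) (m : List Int) (p : Int × Int) :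
    (pvFA mer t m p).length = m.length := by
  unfold pvFA; split <;> simp [pvPaint_length]

lemma pvFoldA_get (mer t : Int) (xs : List Int) (s : Int) (hs : 0 ≤ s) (m : List Int) (k : Nat) :
    (pvQA xs mer t s m.length k → ((PySem.List.enumerate xs s).foldl (pvFA mer t) m)[k]? = some 1) ∧
    (¬ pvQA xs mer t s m.length k →
      ((PySem.List.enumerate xs s).foldl (pvFA mer t) m)[k]? = m[k]?) := by
  induction xs generalizing s m with
  | nil =>
    exact ⟨fun h => absurd h (pvQA_nil mer t s m.length k),
      fun _ => by simp [PySem.List.enumerate_nil]⟩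
  | cons x xs ih =>
    simp only [PySem.List.enumerate_cons, List.foldl_cons]
    obtain ⟨ih1, ih2⟩ := ih (s + 1) (by omega) (pvFA mer t m (s, x))
    rw [pvFA_length] at ih1 ih2
    by_cases hx : x > t
    · have hm' : pvFA mer t m (s, x) = pvPaint m s (min (s + mer) (m.length : Int)) := by
        simp [pvFA, hx]
      constructor
      · intro hp
        rcases (pvQA_cons x xs mer t s m.length k).mp hp with ⟨hgt, h1, h2, h3⟩ | h'
        · by_cases hq : pvQA xs mer t (s + 1) m.length k
          · exact ih1 hq
          · rw [ih2 hq, hm', pvPaint_get m s _ hs (by omega) k,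
              if_pos ⟨h1, by omega⟩]
        · exact ih1 h'
      · intro hp
        rw [ih2 (fun h => hp ((pvQA_cons x xs mer t s m.length k).mpr (Or.inr h))), hm',
          pvPaint_get m s _ hs (by omega) k,
          if_neg (fun h => hp ((pvQA_cons x xs mer t s m.length k).mpr
            (Or.inl ⟨hx, h.1, by omega, by omega⟩)))]
    · have hm' : pvFA mer t m (s, x) = m := by simp [pvFA, hx]
      rw [hm'] at ih1 ih2 ⊢
      constructor
      · intro hp
        rcases (pvQA_cons x xs mer t s m.length k).mp hp with ⟨h', _⟩ | h'
        · exact absurd h' hx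
        · exact ih1 h'
      · intro hp
        exact ih2 (fun h => hp ((pvQA_cons x xs mer t s m.length k).mpr (Or.inr h)))

-- the two coverage predicates agree at offset 0 / reach 0, for in-range k
lemma pvQA_iff_pvPm (xs : List Int) (mer t : Int) (k : Nat) (hk : k < xs.length) :
    pvQA xs mer t 0 xs.length k ↔ pvPm xs mer t 0 0 k := by
  unfold pvQA pvPm
  constructor
  · rintro ⟨j, hj, hgt, h1, h2, h3⟩
    exact Or.inr ⟨j, by simp at hj ⊢; omega, hgt, by omega⟩
  · rintro (h | ⟨j, hj, hgt, hlt⟩)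
    · omega
    · exact ⟨j, by simp at hj ⊢; omega, hgt, by simp at hj; omega, by omega, by omega⟩

-- ===== VERDICT (by name: the statement is the Claim_ definition above) =====
theorem hits_to_mask_spec : Claim_equal_hits_to_mask := by
  intro hits mer t _
  unfold Spec_hits_to_mask
  unfold hits_to_mask hits_to_mask_alt
  rw [pvFoldB_eq mer t hits 0 0 []]
  simp only [List.nil_append]
  have hA : (PySem.List.enumerate hits 0).foldl
      (fun mask p => if p.2 > t then pvPaint mask p.1 (min (p.1 + mer) (mask.length : Int))
        else mask) (List.replicate hits.length (0 : Int))
      = (PySem.List.enumerate hits 0).foldl (pvFA mer t)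
        (List.replicate hits.length (0 : Int)) := rfl
  rw [hA]
  apply List.ext_getElem?
  intro k
  obtain ⟨hA1, hA2⟩ := pvFoldA_get mer t hits 0 le_rfl (List.replicate hits.length (0 : Int)) k
  simp only [List.length_replicate] at hA1 hA2
  by_cases hk : k < hits.length
  · obtain ⟨hB1, hB2⟩ := pvOutB_get mer t hits 0 0 k hk
    by_cases hp : pvPm hits mer t 0 0 k
    · rw [hA1 ((pvQA_iff_pvPm hits mer t k hk).mpr hp), hB1 hp]
    · rw [hA2 (fun h => hp ((pvQA_iff_pvPm hits mer t k hk).mp h)), hB2 hp,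
        List.getElem?_replicate, if_pos hk]
  · have hq : ¬ pvQA hits mer t 0 hits.length k := by
      unfold pvQA
      rintro ⟨j, hj, _, h1', h2', h3'⟩
      omega
    have h1 : (List.replicate hits.length (0 : Int))[k]? = none := by
      simp; omega
    have h2 : (pvOutB mer t hits 0 0)[k]? = none := by
      rw [List.getElem?_eq_none_iff, pvOutB_length]; omega
    rw [h2, hA2 hq, h1]
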